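-- pv_equiv track=rewrite | github.com/Keiracom/Agency_OS | src/pipeline/stage_5_dm_waterfall.py | _pick_best_dm
-- ===== SOURCE A (Python) =====
-- PRIORITY_TITLES = [
--     "owner", "founder", "co-founder", "director", "ceo",
--     "chief executive", "managing director", "md",
--     "general manager", "head of", "principal", "partner",
-- ]
--
-- def _pick_best_dm(employees: list[dict]) -> dict | None:
--     """Pick highest-priority DM from employee list."""
--     if not employees:
--         return None
--     for priority in PRIORITY_TITLES:
--         for emp in employees:
--             title = (emp.get("title") or emp.get("job_title") or "").lower()
--             if priority in title:
--                 return emp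
--     return employees[0] if employees else None
-- ===== SOURCE B (Python) =====
-- PRIORITY_TITLES = [
--     "owner", "founder", "co-founder", "director", "ceo",
--     "chief executive", "managing director", "md",
--     "general manager", "head of", "principal", "partner",
-- ]
--
-- def _rank(emp):
--     """Priority rank: index of the first keyword occurring in the employee's
--     title, or len(PRIORITY_TITLES) when none does."""
--     title = (emp.get("title") or emp.get("job_title") or "").lower()
--     return next((i for i, kw in enumerate(PRIORITY_TITLES) if kw in title),
--                 len(PRIORITY_TITLES))
--
-- def _pick_best_dm(employees: list[dict]) -> dict | None:
--     """Pick highest-priority DM from employee list."""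
--     if not employees:
--         return None
--     return min(employees, key=_rank)
-- ===== Notes on version B (the rewrite author's own statement) =====
-- stated objective: simpler
-- what changed: Replaced A's priority-major nested loop with early return by a single employee-major argmin: a rank helper maps each employee to the index of its first matching priority keyword, and min(employees, key=_rank) with its stable first-minimal tie-break returns the same employee.
import Mathlib
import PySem

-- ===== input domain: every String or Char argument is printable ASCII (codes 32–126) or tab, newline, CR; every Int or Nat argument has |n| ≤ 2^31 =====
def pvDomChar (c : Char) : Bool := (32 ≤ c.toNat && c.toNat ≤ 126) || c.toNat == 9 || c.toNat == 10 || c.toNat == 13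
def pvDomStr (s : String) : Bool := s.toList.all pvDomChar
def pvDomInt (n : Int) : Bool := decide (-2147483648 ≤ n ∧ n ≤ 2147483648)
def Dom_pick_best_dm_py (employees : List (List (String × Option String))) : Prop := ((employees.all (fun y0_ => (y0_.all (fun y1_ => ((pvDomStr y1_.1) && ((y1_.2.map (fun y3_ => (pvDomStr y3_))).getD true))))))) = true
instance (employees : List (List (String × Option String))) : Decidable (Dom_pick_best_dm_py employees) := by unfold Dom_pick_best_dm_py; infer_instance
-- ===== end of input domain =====

-- ===== PORT A =====
-- B is a simpler decomposition of the same task: a rank helper plus a stable argmin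
-- over employees, replacing A's priority-major nested loop with early return.

-- shared helper: the title expression "(emp.get('title') or emp.get('job_title') or '').lower()"
-- appearing verbatim in both Pythons.  Python `x or y`: x if truthy (a non-empty string) else y.
def pvTruthy (o : Option (Option String)) : Option String :=
  match o with
  | some (some s) => if s = "" then none else some s
  | _ => none

def pvTitle (emp : List (String × Option String)) : String :=
  PySem.Str.lower
    ((pvTruthy (PySem.Dict.get? ⟨emp⟩ "title")).getD
      ((pvTruthy (PySem.Dict.get? ⟨emp⟩ "job_title")).getD ""))

def PRIORITY_TITLES : List String :=
  ["owner", "founder", "co-founder", "director", "ceo",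
   "chief executive", "managing director", "md",
   "general manager", "head of", "principal", "partner"]

-- A's inner loop:  for emp in employees: … if priority in title: return emp
def pickA_inner (p : String) : List (List (String × Option String)) → Option (List (String × Option String))
  | [] => none
  | e :: t => if PySem.Str.isIn p (pvTitle e) then some e else pickA_inner p t

-- A's outer loop:  for priority in PRIORITY_TITLES: …
def pickA_outer : List String → List (List (String × Option String)) → Option (List (String × Option String))
  | [], _ => none
  | p :: ps, es =>
    match pickA_inner p es with
    | some e => some e
    | none => pickA_outer ps es

def pick_best_dm_py (employees : List (List (String × Option String))) : Option (List (String × Option String)) :=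
  if employees = [] then none
  else
    match pickA_outer PRIORITY_TITLES employees with
    | some e => some e
    | none => if employees = [] then none else PySem.List.pyGet? employees 0

-- ===== PORT B =====
-- _rank's search:  next((i for i, kw in enumerate(PRIORITY_TITLES) if kw in title), len(PRIORITY_TITLES))
-- ported as a structural recursion carrying enumerate's index counter r
def pvRankLoop (title : String) : List String → Nat → Nat
  | [], r => r
  | p :: ps, r => if PySem.Str.isIn p title then r else pvRankLoop title ps (r + 1)

def pvRank (emp : List (String × Option String)) : Nat :=
  pvRankLoop (pvTitle emp) PRIORITY_TITLES 0

def pick_best_dm_py_alt (employees : List (List (String × Option String))) : Option (List (String × Option String)) :=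
  if employees = [] then none
  else PySem.List.min? employees pvRank

-- ===== PRECONDITION & SPEC =====
def Spec_pick_best_dm_py (employees : List (List (String × Option String))) (out : Option (List (String × Option String))) : Prop := out = pick_best_dm_py_alt employees
instance (employees : List (List (String × Option String))) (out : Option (List (String × Option String))) : Decidable (Spec_pick_best_dm_py employees out) := by unfold Spec_pick_best_dm_py; infer_instance

-- ===== CLAIM (what is proved, stated in full; the proofs are below) =====
def Claim_equal_pick_best_dm_py : Prop := ∀ (employees : List (List (String × Option String))), Dom_pick_best_dm_py employees → Spec_pick_best_dm_py employees (pick_best_dm_py employees)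

-- ===== LEMMAS AND PROOFS =====

-- the running minimum of min? on a non-empty list
def pvStep {α : Type} (key : α → Nat) (m x : α) : α := if key x < key m then x else m

theorem pvFoldl_some {α : Type} (key : α → Nat) :
    ∀ (es : List α) (m : α),
      es.foldl (fun acc x => match acc with
        | none => some x
        | some m => if key x < key m then some x else some m) (some m)
      = some (es.foldl (pvStep key) m) := by
  intro es
  induction es with
  | nil => intro m; rfl
  | cons y t ih =>
    intro m
    simp only [List.foldl, pvStep]
    split <;> exact ih _

theorem pvMin?_cons {α : Type} (key : α → Nat) (e : α) (es : List α) :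
    PySem.List.min? (e :: es) key = some (es.foldl (pvStep key) e) := by
  simp only [PySem.List.min?, List.foldl]
  exact pvFoldl_some key es e

-- an accumulator of rank 0 is never displaced
theorem pvMin_absorb {α : Type} (key : α → Nat) :
    ∀ (es : List α) (m : α), key m = 0 → es.foldl (pvStep key) m = m := by
  intro es
  induction es with
  | nil => intro m _; rfl
  | cons y t ih =>
    intro m hm
    simp only [List.foldl, pvStep, hm]
    simp only [Nat.not_lt_zero, if_false]
    exact ih m hm

-- the fold picks the first element satisfying pred (rank 0) when the accumulator has positive rank
theorem pvMin_first_zero {α : Type} (key : α → Nat) (pred : α → Bool)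
    (hpred : ∀ y, pred y = true ↔ key y = 0) :
    ∀ (es : List α) (m x : α), 0 < key m →
      List.find? pred es = some x →
      es.foldl (pvStep key) m = x := by
  intro es
  induction es with
  | nil => intro m x _ h; simp at h
  | cons y t ih =>
    intro m x hm h
    by_cases hy : pred y
    · have hx : x = y := by
        simp [List.find?, hy] at h; exact h.symm
      have hy0 : key y = 0 := (hpred y).mp hy
      have hc : key y < key m := by rw [hy0]; exact hm
      have hstep : pvStep key m y = y := by simp [pvStep, hc]
      rw [hx, List.foldl_cons, hstep]
      exact pvMin_absorb key t y hy0
    · have h' : List.find? pred t = some x := by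
        simpa [List.find?, hy] using h
      have hy0 : key y ≠ 0 := fun h0 => hy ((hpred y).mpr h0)
      simp only [List.foldl, pvStep]
      split
      · exact ih y x (Nat.pos_of_ne_zero hy0) h'
      · exact ih m x hm h'

-- the argmin is invariant under shifting the key by 1 on all the elements involved
theorem pvMin_shift {α : Type} (f g : α → Nat) :
    ∀ (es : List α) (m : α), (∀ y ∈ m :: es, f y = g y + 1) →
      es.foldl (pvStep f) m = es.foldl (pvStep g) m := by
  intro es
  induction es with
  | nil => intro m _; rfl
  | cons y t ih =>
    intro m h
    have hm : f m = g m + 1 := h m (by simp)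
    have hy : f y = g y + 1 := h y (by simp)
    have hstep : pvStep f m y = pvStep g m y := by
      simp only [pvStep, hm, hy, Nat.add_lt_add_iff_right]
    simp only [List.foldl, hstep]
    apply ih
    intro z hz
    rw [List.mem_cons] at hz
    rcases hz with hz | hz
    · subst hz
      by_cases hc : g y < g m
      · simpa [pvStep, hc] using hy
      · simpa [pvStep, hc] using hm
    · exact h z (List.mem_cons_of_mem _ (List.mem_cons_of_mem _ hz))

theorem pvRankLoop_shift (ps : List String) :
    ∀ (t : String) (r : Nat), pvRankLoop t ps (r + 1) = pvRankLoop t ps r + 1 := by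
  induction ps with
  | nil => intro t r; rfl
  | cons p ps ih =>
    intro t r
    simp only [pvRankLoop]
    split
    · rfl
    · exact ih t (r + 1)

theorem pickA_inner_eq_find? (p : String) :
    ∀ (es : List (List (String × Option String))),
      pickA_inner p es = List.find? (fun e => PySem.Str.isIn p (pvTitle e)) es := by
  intro es
  induction es with
  | nil => rfl
  | cons e t ih =>
    simp only [pickA_inner, List.find?, PySem.Str.isIn, ih]
    cases PySem.Chars.isIn p.toList (pvTitle e).toList <;> simp

-- key characterisation: the rank over the priority list p :: ps is 0 iff p matches
theorem pvRank_zero_iff (p : String) (ps : List String) (y : List (String × Option String)) :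
    PySem.Str.isIn p (pvTitle y) = true ↔ pvRankLoop (pvTitle y) (p :: ps) 0 = 0 := by
  have h0 : pvRankLoop (pvTitle y) (p :: ps) 0
      = if PySem.Str.isIn p (pvTitle y) then 0 else pvRankLoop (pvTitle y) ps 1 := rfl
  by_cases h : PySem.Str.isIn p (pvTitle y)
  · rw [h0, if_pos h]
    exact ⟨fun _ => rfl, fun _ => h⟩
  · rw [h0, if_neg h, pvRankLoop_shift ps (pvTitle y) 0]
    exact ⟨fun hh => absurd hh h, fun hh => absurd hh (Nat.succ_ne_zero _)⟩

-- MAIN: A's nested-loop result on a non-empty list is the first rank-minimal employee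
theorem pvMain :
    ∀ (ps : List String) (e : List (String × Option String)) (es : List (List (String × Option String))),
      (match pickA_outer ps (e :: es) with | some x => x | none => e)
        = es.foldl (pvStep (fun y => pvRankLoop (pvTitle y) ps 0)) e := by
  intro ps
  induction ps with
  | nil =>
    intro e es
    simp only [pickA_outer]
    exact (pvMin_absorb _ es e rfl).symm
  | cons p ps ih =>
    intro e es
    cases h : pickA_inner p (e :: es) with
    | some x =>
      simp only [pickA_outer, h]
      have hfind : List.find? (fun y => PySem.Str.isIn p (pvTitle y)) (e :: es) = some x :=
        (pickA_inner_eq_find? p (e :: es)).symm.trans h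
      by_cases hp : PySem.Str.isIn p (pvTitle e)
      · simp only [List.find?, hp] at hfind
        obtain rfl : e = x := Option.some.inj hfind
        rw [pvMin_absorb _ es e ((pvRank_zero_iff p ps e).mp hp)]
      · rw [Bool.not_eq_true] at hp
        simp only [List.find?, hp] at hfind
        have h0 : pvRankLoop (pvTitle e) (p :: ps) 0 ≠ 0 := by
          intro hz
          have ht := (pvRank_zero_iff p ps e).mpr hz
          rw [hp] at ht
          exact Bool.false_ne_true ht
        exact (pvMin_first_zero _ _ (fun y => pvRank_zero_iff p ps y) es e x (Nat.pos_of_ne_zero h0) hfind).symm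
    | none =>
      have hnone : ∀ y ∈ e :: es, ¬ PySem.Str.isIn p (pvTitle y) = true := by
        intro y hy
        have hf : List.find? (fun y => PySem.Str.isIn p (pvTitle y)) (e :: es) = none :=
          (pickA_inner_eq_find? p (e :: es)).symm.trans h
        exact List.find?_eq_none.mp hf y hy
      have hshift : ∀ y ∈ e :: es,
          pvRankLoop (pvTitle y) (p :: ps) 0 = pvRankLoop (pvTitle y) ps 0 + 1 := by
        intro y hy
        have h0 : pvRankLoop (pvTitle y) (p :: ps) 0
            = if PySem.Str.isIn p (pvTitle y) then 0 else pvRankLoop (pvTitle y) ps 1 := rfl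
        rw [h0, if_neg (hnone y hy), pvRankLoop_shift ps (pvTitle y) 0]
      simp only [pickA_outer, h]
      rw [pvMin_shift _ _ es e hshift]
      exact ih e es

-- ===== VERDICT (by name: the statement is the Claim_ definition above) =====
theorem pick_best_dm_py_spec : Claim_equal_pick_best_dm_py := by
  unfold Claim_equal_pick_best_dm_py
  intro employees _
  unfold Spec_pick_best_dm_py
  cases employees with
  | nil => rfl
  | cons e es =>
    simp only [pick_best_dm_py, pick_best_dm_py_alt, if_neg (List.cons_ne_nil e es)]
    rw [pvMin?_cons pvRank e es]
    have hmain := pvMain PRIORITY_TITLES e es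
    cases h : pickA_outer PRIORITY_TITLES (e :: es) with
    | some x =>
      rw [h] at hmain
      exact congrArg some hmain
    | none =>
      rw [h] at hmain
      show (if (e :: es : List (List (String × Option String))) = [] then none
            else PySem.List.pyGet? (e :: es) 0)
          = some (List.foldl (pvStep pvRank) e es)
      rw [if_neg (List.cons_ne_nil e es), PySem.List.pyGet?_zero_cons]
      exact congrArg some hmain
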